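-- pv_equiv track=rewrite | github.com/Lanver123/ProyectoSAR | SAR_searcher_ampliado.py | op_ANDNOT
-- ===== SOURCE A (Python) =====
-- def op_ANDNOT(l1,l2):
--     res = []
--     p1 = 0
--     p2 = 0
--
--     l1 = sorted(l1)
--     l2 = sorted(l2)
--
--     while p1 < len(l1) and p2 < len(l2):
--         if l1[p1] == l2[p2]:
--             p1 += 1
--             p2 += 1
--         else:
--             if l1[p1][0] < l2[p2][0]:
--                 res.append(l1[p1])
--                 p1 += 1
--             elif l1[p1][0] == l2[p2][0]:
--                 if l1[p1][1] < l2[p2][1]: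
--                     res.append(l1[p1])
--                     p1 += 1
--                 else:
--                     p2 += 1
--             else:
--                 p2 += 1
--     while p1 < len(l1):
--         res.append(l1[p1])
--         p1 += 1
--
--     return res
-- ===== SOURCE B (Python) =====
-- def op_ANDNOT(l1, l2):
--     cnt = {}
--     for x in l2:
--         cnt[x] = cnt.get(x, 0) + 1
--     res = []
--     for x in sorted(l1):
--         c = cnt.get(x, 0)
--         if c > 0:
--             cnt[x] = c - 1
--         else:
--             res.append(x)
--     return res
-- ===== Notes on version B (the rewrite author's own statement) =====
-- stated objective: alternative
-- what changed: Replaces the sort-both-lists + two-pointer merge with a hash-count subtraction: build a dict of occurrence counts of l2 once, then make a single pass over sorted(l1) emitting each element whose count is exhausted (l2 is never sorted).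
import Mathlib
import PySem

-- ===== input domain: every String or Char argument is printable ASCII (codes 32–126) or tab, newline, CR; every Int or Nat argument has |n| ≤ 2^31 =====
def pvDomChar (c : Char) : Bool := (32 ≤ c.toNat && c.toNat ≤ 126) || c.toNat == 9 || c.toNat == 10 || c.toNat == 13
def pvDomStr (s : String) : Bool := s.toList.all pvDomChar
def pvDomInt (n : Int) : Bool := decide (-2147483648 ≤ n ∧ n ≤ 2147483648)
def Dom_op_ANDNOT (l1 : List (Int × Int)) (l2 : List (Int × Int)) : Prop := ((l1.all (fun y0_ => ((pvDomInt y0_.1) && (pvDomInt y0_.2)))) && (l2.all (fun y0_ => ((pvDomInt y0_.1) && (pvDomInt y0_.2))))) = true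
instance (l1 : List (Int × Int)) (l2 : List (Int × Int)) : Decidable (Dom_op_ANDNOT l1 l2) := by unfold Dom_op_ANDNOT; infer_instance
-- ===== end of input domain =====

-- B replaces A's sort-both + two-pointer merge by a hash count of l2 and a single
-- pass over sorted(l1) (objective: alternative algorithm of similar cost).


-- ===== PORT A =====
-- A's while loops: res is the accumulated output, the two list arguments are the
-- unread suffixes of the sorted inputs (pointer p = dropped prefix).
def opAndnotLoop : List (Int × Int) → List (Int × Int) → List (Int × Int) → List (Int × Int)
  | res, x :: s1, y :: s2 =>
    if x = y then opAndnotLoop res s1 s2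
    else if x.1 < y.1 then opAndnotLoop (res ++ [x]) s1 (y :: s2)
    else if x.1 = y.1 then
      if x.2 < y.2 then opAndnotLoop (res ++ [x]) s1 (y :: s2)
      else opAndnotLoop res (x :: s1) s2
    else opAndnotLoop res (x :: s1) s2
  | res, s1, [] => res ++ s1      -- second while: append the rest of l1
  | res, [], _ => res
termination_by res s1 s2 => s1.length + s2.length

def op_ANDNOT (l1 : List (Int × Int)) (l2 : List (Int × Int)) : List (Int × Int) :=
  opAndnotLoop [] (PySem.List.sorted2 l1 Prod.fst Prod.snd) (PySem.List.sorted2 l2 Prod.fst Prod.snd)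

-- ===== PORT B =====
def op_ANDNOT_alt (l1 : List (Int × Int)) (l2 : List (Int × Int)) : List (Int × Int) :=
  let cnt : PySem.Dict (Int × Int) Int :=
    l2.foldl (fun d x => d.insert x (d.getD x 0 + 1)) PySem.Dict.empty
  let fin := (PySem.List.sorted2 l1 Prod.fst Prod.snd).foldl
    (fun (st : PySem.Dict (Int × Int) Int × List (Int × Int)) x =>
      let c := st.1.getD x 0
      if c > 0 then (st.1.insert x (c - 1), st.2) else (st.1, st.2 ++ [x]))
    (cnt, [])
  fin.2

-- ===== PRECONDITION & SPEC =====
def Spec_op_ANDNOT (l1 : List (Int × Int)) (l2 : List (Int × Int)) (out : List (Int × Int)) : Prop := out = op_ANDNOT_alt l1 l2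
instance (l1 : List (Int × Int)) (l2 : List (Int × Int)) (out : List (Int × Int)) : Decidable (Spec_op_ANDNOT l1 l2 out) := by unfold Spec_op_ANDNOT; infer_instance

-- ===== CLAIM (what is proved, stated in full; the proofs are below) =====
def Claim_equal_op_ANDNOT : Prop := ∀ (l1 : List (Int × Int)) (l2 : List (Int × Int)), Dom_op_ANDNOT l1 l2 → Spec_op_ANDNOT l1 l2 (op_ANDNOT l1 l2)

-- ===== LEMMAS AND PROOFS =====

-- A's merge without the accumulator.
def mergeDiff : List (Int × Int) → List (Int × Int) → List (Int × Int)
  | x :: s1, y :: s2 =>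
    if x = y then mergeDiff s1 s2
    else if x.1 < y.1 then x :: mergeDiff s1 (y :: s2)
    else if x.1 = y.1 then
      if x.2 < y.2 then x :: mergeDiff s1 (y :: s2)
      else mergeDiff (x :: s1) s2
    else mergeDiff (x :: s1) s2
  | s1, [] => s1
  | [], _ => []
termination_by s1 s2 => s1.length + s2.length

theorem opAndnotLoop_eq (res s1 s2 : List (Int × Int)) :
    opAndnotLoop res s1 s2 = res ++ mergeDiff s1 s2 := by
  induction res, s1, s2 using opAndnotLoop.induct <;>
    simp_all [opAndnotLoop, mergeDiff] <;> split_ifs <;> first | rfl | omega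

-- B's single pass, with the counts abstracted to a function.
def cScan : List (Int × Int) → ((Int × Int) → Int) → List (Int × Int)
  | [], _ => []
  | x :: s, c => if 0 < c x then cScan s (fun y => if y = x then c x - 1 else c y) else x :: cScan s c

theorem cScan_congr : ∀ (s : List (Int × Int)) (c c' : (Int × Int) → Int),
    (∀ x ∈ s, c x = c' x) → cScan s c = cScan s c' := by
  intro s
  induction s with
  | nil => intro c c' _; rfl
  | cons x s ih =>
    intro c c' h
    have hx : c x = c' x := h x (by simp)
    simp only [cScan, hx]
    split
    · exact ih _ _ (fun z hz => by by_cases hzx : z = x <;> simp [hzx, h z (by simp [hz])])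
    · exact congrArg (x :: ·) (ih _ _ (fun z hz => h z (by simp [hz])))

theorem cScan_of_nonpos : ∀ (s : List (Int × Int)) (c : (Int × Int) → Int),
    (∀ x ∈ s, ¬ 0 < c x) → cScan s c = s := by
  intro s
  induction s with
  | nil => intro c _; rfl
  | cons x s ih =>
    intro c h
    simp only [cScan, if_neg (h x (by simp))]
    exact congrArg (x :: ·) (ih c (fun z hz => h z (by simp [hz])))

-- the key step: on sorted inputs A's merge is B's counted scan
theorem mergeDiff_eq_cScan : ∀ (s1 s2 : List (Int × Int)),
    s1.Pairwise (fun a b => (toLex a : Lex (Int × Int)) ≤ toLex b) →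
    s2.Pairwise (fun a b => (toLex a : Lex (Int × Int)) ≤ toLex b) →
    mergeDiff s1 s2 = cScan s1 (fun x => (s2.count x : Int)) := by
  intro s1 s2
  induction s1, s2 using mergeDiff.induct with
  | case1 s1 y s2 ih =>
    intro p1 p2
    have hc : (0:Int) < (((y :: s2).count y : Nat) : Int) := by
      rw [List.count_cons_self]; exact_mod_cast Nat.succ_pos _
    rw [mergeDiff, if_pos rfl, cScan, if_pos hc, ih p1.of_cons p2.of_cons]
    refine (cScan_congr _ _ _ (fun z hz => ?_)).symm
    split_ifs with hzy
    · subst hzy; rw [List.count_cons_self]; push_cast; omega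
    · rw [List.count_cons, show (y == z) = false from by simpa using fun e => hzy e.symm]
      simp
  | case2 x s1 y s2 h h1 ih =>
    intro p1 p2
    have hlt : (toLex x : Lex (Int × Int)) < toLex y := Prod.Lex.lt_iff.mpr (Or.inl h1)
    have hnm : x ∉ y :: s2 := by
      intro hm
      rcases List.mem_cons.mp hm with hm' | hm'
      · exact absurd (hm' ▸ hlt) (lt_irrefl _)
      · exact absurd (lt_of_lt_of_le hlt ((List.pairwise_cons.mp p2).1 x hm')) (lt_irrefl _)
    have hc0 : ((y :: s2).count x : Int) = 0 := by
      rw [List.count_eq_zero.mpr hnm]; rfl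
    rw [mergeDiff, if_neg h, if_pos h1, cScan, if_neg (by rw [hc0]; omega)]
    exact congrArg (x :: ·) (ih p1.of_cons p2)
  | case3 x s1 y s2 h h1 h2 h3 ih =>
    intro p1 p2
    have hlt : (toLex x : Lex (Int × Int)) < toLex y := Prod.Lex.lt_iff.mpr (Or.inr ⟨h2, h3⟩)
    have hnm : x ∉ y :: s2 := by
      intro hm
      rcases List.mem_cons.mp hm with hm' | hm'
      · exact absurd (hm' ▸ hlt) (lt_irrefl _)
      · exact absurd (lt_of_lt_of_le hlt ((List.pairwise_cons.mp p2).1 x hm')) (lt_irrefl _)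
    have hc0 : ((y :: s2).count x : Int) = 0 := by
      rw [List.count_eq_zero.mpr hnm]; rfl
    rw [mergeDiff, if_neg h, if_neg h1, if_pos h2, if_pos h3, cScan,
      if_neg (by rw [hc0]; omega)]
    exact congrArg (x :: ·) (ih p1.of_cons p2)
  | case4 x s1 y s2 h h1 h2 h3 ih =>
    intro p1 p2
    have hlt : (toLex y : Lex (Int × Int)) < toLex x := by
      refine Prod.Lex.lt_iff.mpr (Or.inr ⟨h2.symm, ?_⟩)
      rcases lt_or_eq_of_le (le_of_not_gt h3) with h4 | h4
      · exact h4
      · exact absurd (Prod.ext h2.symm h4) (fun e => h e.symm)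
    rw [mergeDiff, if_neg h, if_neg h1, if_pos h2, if_neg h3, ih p1 p2.of_cons]
    refine (cScan_congr _ _ _ (fun z hz => ?_)).symm
    have hyz : (toLex y : Lex (Int × Int)) < toLex z := by
      rcases List.mem_cons.mp hz with hz' | hz'
      · rw [hz']; exact hlt
      · exact lt_of_lt_of_le hlt ((List.pairwise_cons.mp p1).1 z hz')
    have hzy : z ≠ y := fun e => absurd (e ▸ hyz) (lt_irrefl _)
    rw [List.count_cons, if_neg (by simpa using fun e => hzy e.symm), Nat.add_zero]
  | case5 x s1 y s2 h h1 h2 ih =>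
    intro p1 p2
    have hlt : (toLex y : Lex (Int × Int)) < toLex x :=
      Prod.Lex.lt_iff.mpr (Or.inl (lt_of_le_of_ne (le_of_not_gt h1) (fun e => h2 e.symm)))
    rw [mergeDiff, if_neg h, if_neg h1, if_neg h2, ih p1 p2.of_cons]
    refine (cScan_congr _ _ _ (fun z hz => ?_)).symm
    have hyz : (toLex y : Lex (Int × Int)) < toLex z := by
      rcases List.mem_cons.mp hz with hz' | hz'
      · rw [hz']; exact hlt
      · exact lt_of_lt_of_le hlt ((List.pairwise_cons.mp p1).1 z hz')
    have hzy : z ≠ y := fun e => absurd (e ▸ hyz) (lt_irrefl _)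
    rw [List.count_cons, if_neg (by simpa using fun e => hzy e.symm), Nat.add_zero]
  | case6 s1 =>
    intro _ _
    have h6 : mergeDiff s1 [] = s1 := by cases s1 <;> simp [mergeDiff]
    rw [h6]
    exact (cScan_of_nonpos _ _ (fun z _ => by simp)).symm
  | case7 s2 hne =>
    intro _ _
    cases s2 <;> simp [mergeDiff, cScan]

theorem bfold_eq_cScan : ∀ (s : List (Int × Int)) (d : PySem.Dict (Int × Int) Int) (res : List (Int × Int)),
    (s.foldl (fun (st : PySem.Dict (Int × Int) Int × List (Int × Int)) x =>
      let c := st.1.getD x 0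
      if c > 0 then (st.1.insert x (c - 1), st.2) else (st.1, st.2 ++ [x])) (d, res)).2
    = res ++ cScan s (fun x => d.getD x 0) := by
  intro s
  induction s with
  | nil => intro d res; simp [cScan]
  | cons x s ih =>
    intro d res
    rw [List.foldl_cons]
    dsimp only
    by_cases hc : (0:Int) < d.getD x 0
    · rw [if_pos hc, ih, cScan]
      rw [if_pos hc]
      congr 1
      exact cScan_congr _ _ _ (fun z _ => by rw [PySem.Dict.getD_insert])
    · rw [if_neg hc, ih, cScan, if_neg hc, List.append_assoc, List.singleton_append]

theorem sorted2_eq_sorted_lex (xs : List (Int × Int)) :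
    PySem.List.sorted2 xs Prod.fst Prod.snd
      = PySem.List.sorted xs (fun p => (toLex p : Lex (Int × Int))) := by
  rw [PySem.List.sorted_eq_foldl_insertBy]
  show xs.foldl (fun acc x => PySem.List.insertBy
      (fun a b => decide (a.1 < b.1) || (!decide (b.1 < a.1) && decide (a.2 < b.2))) x acc) [] = _
  have hb : (fun (a b : Int × Int) => decide (a.1 < b.1) || (!decide (b.1 < a.1) && decide (a.2 < b.2)))
      = fun (a b : Int × Int) => decide ((toLex a : Lex (Int × Int)) < toLex b) := by
    funext a b
    rcases a with ⟨a1, a2⟩; rcases b with ⟨b1, b2⟩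
    rcases lt_trichotomy a1 b1 with h | h | h <;>
      rcases lt_trichotomy a2 b2 with h' | h' | h' <;>
      simp [Prod.Lex.lt_iff, h, h'] <;> omega
  rw [hb]

-- ===== VERDICT (by name: the statement is the Claim_ definition above) =====
theorem op_ANDNOT_spec : Claim_equal_op_ANDNOT := by
  intro l1 l2 _
  show op_ANDNOT l1 l2 = op_ANDNOT_alt l1 l2
  unfold op_ANDNOT op_ANDNOT_alt
  rw [sorted2_eq_sorted_lex l1, sorted2_eq_sorted_lex l2]
  rw [opAndnotLoop_eq, List.nil_append, bfold_eq_cScan, List.nil_append,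
    mergeDiff_eq_cScan _ _ (PySem.List.sorted_pairwise l1 _) (PySem.List.sorted_pairwise l2 _)]
  refine cScan_congr _ _ _ (fun z _ => ?_)
  rw [PySem.Dict.getD_foldl_insert_add_one, PySem.Dict.getD_empty, zero_add,
    ((PySem.List.sorted_perm l2 _ _).count_eq z)]
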